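-- pv_equiv track=rewrite | github.com/kktsubota/compe | problems/atcoder/chokudai_today/201908/20_abc026_c_20190831.py | get_salary
-- ===== SOURCE A (Python) =====
-- def get_salary(num, child_dict, salaries):
--     if salaries[num] is not None:
--         pass
--     elif len(child_dict[num]) == 0:
--         salaries[num] = 1
--     else:
--         children = child_dict[num]
--         salaries_child = [get_salary(child, child_dict, salaries) for child in children]
--         salaries[num] = max(salaries_child) + min(salaries_child) + 1
--     return salaries[num]
-- ===== SOURCE B (Python) =====
-- def get_salary(num, child_dict, salaries):
--     # Bottom-up DP over the keys in decreasing order (children are numbered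
--     # after their parent), replacing A's recursion; does NOT mutate salaries.
--     if salaries[num] is not None:
--         return salaries[num]
--     memo = {}
--     for n in sorted(child_dict, reverse=True):
--         if salaries[n] is None:
--             vals = [salaries[c] if salaries[c] is not None else memo[c]
--                     for c in child_dict[n]]
--             memo[n] = max(vals) + min(vals) + 1 if vals else 1
--     return memo[num]
-- ===== Notes on version B (the rewrite author's own statement) =====
-- stated objective: alternative
-- what changed: Replaces A's memoized recursion (which mutates the salaries cache) with an iterative bottom-up dynamic program: iterate the dict keys once in decreasing order (children are numbered strictly after their parent, the problem's input contract) and fill a local memo table, so no recursion and no mutation of salaries; equivalence is about the return value only.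
-- outside the precondition, e.g. on get_salary(1, {1: [0], 0: []}, [None, None]): A returns 3, B raises KeyError
import Mathlib
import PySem

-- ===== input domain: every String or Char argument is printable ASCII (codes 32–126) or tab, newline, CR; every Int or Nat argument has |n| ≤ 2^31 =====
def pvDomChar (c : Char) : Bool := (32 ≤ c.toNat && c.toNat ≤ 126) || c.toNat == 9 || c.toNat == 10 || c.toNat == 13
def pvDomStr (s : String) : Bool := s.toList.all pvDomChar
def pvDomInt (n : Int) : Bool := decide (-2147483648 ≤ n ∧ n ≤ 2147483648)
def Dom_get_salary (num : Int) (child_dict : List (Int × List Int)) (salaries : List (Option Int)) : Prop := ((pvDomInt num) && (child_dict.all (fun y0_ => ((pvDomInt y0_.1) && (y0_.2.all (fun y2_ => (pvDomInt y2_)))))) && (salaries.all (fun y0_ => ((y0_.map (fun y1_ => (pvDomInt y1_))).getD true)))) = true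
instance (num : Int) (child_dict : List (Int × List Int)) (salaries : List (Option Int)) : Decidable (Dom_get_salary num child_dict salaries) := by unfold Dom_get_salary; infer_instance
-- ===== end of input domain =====

-- B replaces A's memoized recursion by an iterative bottom-up DP over the dict keys in
-- decreasing order. A mutates `salaries` in place and B does not: the equivalence proved
-- here is about the RETURN value only.

-- ===== PORT A =====
-- A's recursion; the fuel counter only makes it total in Lean (2*len+2 never runs out
-- on inputs admitted by Pre_), and the mutated salaries list is threaded as state.
def getSalaryGoA (cd : PySem.Dict Int (List Int)) :
    Nat → Int → List (Option Int) → Int × List (Option Int)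
  | 0, _, sal => (0, sal)                                 -- fuel exhausted (unreachable under Pre_)
  | fuel+1, num, sal =>
    match PySem.List.pyGet? sal num with
    | some (some v) => (v, sal)                           -- salaries[num] is not None: pass
    | _ =>
      match cd.get? num with
      | none => (0, sal)                                  -- Python raises KeyError here (outside Pre_)
      | some children =>
        if children.isEmpty then
          let sal' := PySem.List.pySetD sal num (some 1)  -- salaries[num] = 1
          (((PySem.List.pyGet? sal' num).getD none).getD 0, sal')   -- return salaries[num]
        else
          let r := children.foldl
            (fun (acc : List Int × List (Option Int)) c =>
              let s := getSalaryGoA cd fuel c acc.2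
              (acc.1 ++ [s.1], s.2)) ([], sal)            -- salaries_child = [get_salary(child, ...) for child in children]
          let m := (PySem.List.max? r.1 (fun x => x)).getD 0 +
                   (PySem.List.min? r.1 (fun x => x)).getD 0 + 1
          let sal' := PySem.List.pySetD r.2 num (some m)  -- salaries[num] = max(...) + min(...) + 1
          (((PySem.List.pyGet? sal' num).getD none).getD 0, sal')   -- return salaries[num]

def get_salary (num : Int) (child_dict : List (Int × List Int)) (salaries : List (Option Int)) : Int :=
  (getSalaryGoA (PySem.Dict.mk child_dict) (2 * salaries.length + 2) num salaries).1

-- ===== PORT B =====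
-- the body of B's `for n in sorted(child_dict, reverse=True)` loop
def stepB (sal0 : List (Option Int)) (cd : PySem.Dict Int (List Int))
    (memo : PySem.Dict Int Int) (n : Int) : PySem.Dict Int Int :=
  match PySem.List.pyGet? sal0 n with
  | some (some _) => memo                                 -- salaries[n] is not None: skip
  | _ =>
    let vals := ((cd.get? n).getD []).map (fun c =>
      match PySem.List.pyGet? sal0 c with
      | some (some v) => v
      | _ => memo.getD c 0)                               -- salaries[c] if cached else memo[c]
    memo.insert n (if vals.isEmpty then 1 else
      (PySem.List.max? vals (fun x => x)).getD 0 +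
      (PySem.List.min? vals (fun x => x)).getD 0 + 1)

def get_salary_alt (num : Int) (child_dict : List (Int × List Int)) (salaries : List (Option Int)) : Int :=
  let cd := PySem.Dict.mk child_dict
  match PySem.List.pyGet? salaries num with
  | some (some v) => v                                    -- salaries[num] is not None
  | _ =>
    let memo := (PySem.List.sorted cd.keys (fun k => k) true).foldl (stepB salaries cd) PySem.Dict.empty
    memo.getD num 0                                       -- return memo[num]

-- ===== PRECONDITION & SPEC =====
-- Pre_ is the problem's input contract (ABC026 C: every employee's boss has a smaller
-- number): each key's children are in-range EXISTING keys numbered strictly after it —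
-- which is also exactly what makes A's recursion terminate — the queried index is in
-- range, and an uncached query node is a nonnegative key; keys are pairwise distinct
-- because child_dict is the image of a Python dict. It excludes inputs where A raises
-- (KeyError / IndexError / RecursionError) and the corners where an uncached negative
-- index wraps around and aliases a positive one (see the claim's cites).
def Pre_get_salary (num : Int) (child_dict : List (Int × List Int)) (salaries : List (Option Int)) : Prop :=
  PySem.Raise.InRange salaries.length num ∧
  (PySem.List.pyGet? salaries num = some none →
    0 ≤ num ∧ num ∈ child_dict.map Prod.fst ∧ (child_dict.map Prod.fst).Nodup ∧
    ∀ p ∈ child_dict, PySem.Raise.InRange salaries.length p.1 ∧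
      ∀ c ∈ p.2, p.1 < c ∧ c < (salaries.length : Int) ∧ c ∈ child_dict.map Prod.fst)
instance (num : Int) (child_dict : List (Int × List Int)) (salaries : List (Option Int)) : Decidable (Pre_get_salary num child_dict salaries) := by
  unfold Pre_get_salary; infer_instance

def pvWitness_get_salary : Int × (List (Int × List Int)) × List (Option Int) :=
  (0, [(0, [1]), (1, [])], [none, none])

def Spec_get_salary (num : Int) (child_dict : List (Int × List Int)) (salaries : List (Option Int)) (out : Int) : Prop := out = get_salary_alt num child_dict salaries
instance (num : Int) (child_dict : List (Int × List Int)) (salaries : List (Option Int)) (out : Int) : Decidable (Spec_get_salary num child_dict salaries out) := by unfold Spec_get_salary; infer_instance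

-- ===== CLAIM (what is proved, stated in full; the proofs are below) =====
def Claim_equal_get_salary : Prop := ∀ (num : Int) (child_dict : List (Int × List Int)) (salaries : List (Option Int)), Dom_get_salary num child_dict salaries → Pre_get_salary num child_dict salaries → Spec_get_salary num child_dict salaries (get_salary num child_dict salaries)

-- ===== LEMMAS AND PROOFS =====

def Fpure (cd : PySem.Dict Int (List Int)) (sal0 : List (Option Int)) :
    Nat → Int → Int
  | 0, _ => 0
  | fuel+1, n =>
    match PySem.List.pyGet? sal0 n with
    | some (some v) => v
    | _ =>
      match cd.get? n with
      | none => 0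
      | some children =>
        if children.isEmpty then 1
        else
          let vals := children.map (fun c => Fpure cd sal0 fuel c)
          (PySem.List.max? vals (fun x => x)).getD 0 +
          (PySem.List.min? vals (fun x => x)).getD 0 + 1

def GoodCD (cd : PySem.Dict Int (List Int)) (L : Nat) : Prop :=
  ∀ p ∈ cd.items, ∀ c ∈ p.2, p.1 < c ∧ -(L : Int) ≤ c ∧ c < (L : Int) ∧ c ∈ cd.keys

theorem Fpure_mono (cd : PySem.Dict Int (List Int)) (sal0 : List (Option Int))
    (hg : GoodCD cd sal0.length) :
    ∀ (f g : Nat) (n : Int), n < (sal0.length : Int) →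
      ((sal0.length : Int) - n).toNat ≤ f → ((sal0.length : Int) - n).toNat ≤ g →
      Fpure cd sal0 f n = Fpure cd sal0 g n := by
  intro f
  induction f with
  | zero => intro g n hn hf hgf; omega
  | succ f ih =>
    intro g n hn hf hgf
    cases g with
    | zero => omega
    | succ g' =>
      simp only [Fpure]
      cases hpg : PySem.List.pyGet? sal0 n with
      | some o =>
        cases o with
        | some v => rfl
        | none =>
          cases hcd : cd.get? n with
          | none => rfl
          | some children =>
            by_cases he : children.isEmpty
            · simp [he]
            · simp only [he, Bool.false_eq_true]
              have hmap : children.map (fun c => Fpure cd sal0 f c)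
                  = children.map (fun c => Fpure cd sal0 g' c) := by
                apply List.map_congr_left
                intro c hc
                have h := hg (n, children) (PySem.Dict.mem_items_of_get?_eq_some cd hcd) c hc
                exact ih g' c h.2.2.1 (by omega) (by omega)
              rw [hmap]
      | none =>
        cases hcd : cd.get? n with
        | none => rfl
        | some children =>
          by_cases he : children.isEmpty
          · simp [he]
          · simp only [he, Bool.false_eq_true]
            have hmap : children.map (fun c => Fpure cd sal0 f c)
                = children.map (fun c => Fpure cd sal0 g' c) := by
              apply List.map_congr_left
              intro c hc
              have h := hg (n, children) (PySem.Dict.mem_items_of_get?_eq_some cd hcd) c hc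
              exact ih g' c h.2.2.1 (by omega) (by omega)
            rw [hmap]

def Fp (cd : PySem.Dict Int (List Int)) (sal0 : List (Option Int)) (n : Int) : Int :=
  Fpure cd sal0 (2 * sal0.length + 2) n

theorem Fp_hit (cd : PySem.Dict Int (List Int)) (sal0 : List (Option Int)) (n : Int) (v : Int)
    (hpg : PySem.List.pyGet? sal0 n = some (some v)) : Fp cd sal0 n = v := by
  unfold Fp
  rw [show 2 * sal0.length + 2 = (2 * sal0.length + 1) + 1 from rfl]
  simp [Fpure, hpg]

theorem Fp_leaf (cd : PySem.Dict Int (List Int)) (sal0 : List (Option Int)) (n : Int)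
    (hpg : PySem.List.pyGet? sal0 n = some none) (hcd : cd.get? n = some []) :
    Fp cd sal0 n = 1 := by
  unfold Fp
  rw [show 2 * sal0.length + 2 = (2 * sal0.length + 1) + 1 from rfl]
  simp [Fpure, hpg, hcd]

theorem Fp_node (cd : PySem.Dict Int (List Int)) (sal0 : List (Option Int))
    (hg : GoodCD cd sal0.length) (n : Int)
    (hpg : PySem.List.pyGet? sal0 n = some none) (children : List Int)
    (hcd : cd.get? n = some children) (hne : children ≠ []) :
    Fp cd sal0 n =
      (PySem.List.max? (children.map (Fp cd sal0)) (fun x => x)).getD 0 +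
      (PySem.List.min? (children.map (Fp cd sal0)) (fun x => x)).getD 0 + 1 := by
  have hmap : children.map (fun c => Fpure cd sal0 (2 * sal0.length + 1) c)
      = children.map (Fp cd sal0) := by
    apply List.map_congr_left
    intro c hc
    have h := hg (n, children) (PySem.Dict.mem_items_of_get?_eq_some cd hcd) c hc
    exact Fpure_mono cd sal0 hg _ _ c h.2.2.1 (by omega) (by omega)
  conv_lhs => rw [show Fp cd sal0 n = Fpure cd sal0 ((2 * sal0.length + 1) + 1) n from rfl]
  simp only [Fpure, hpg, hcd]
  rw [if_neg (by simp [hne])]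
  show (PySem.List.max? (children.map (fun c => Fpure cd sal0 (2 * sal0.length + 1) c)) (fun x => x)).getD 0 +
       (PySem.List.min? (children.map (fun c => Fpure cd sal0 (2 * sal0.length + 1) c)) (fun x => x)).getD 0 + 1 = _
  rw [hmap]

def CacheOK (cd : PySem.Dict Int (List Int)) (sal0 sal : List (Option Int)) : Prop :=
  sal.length = sal0.length ∧ ∀ j : Nat, j < sal0.length →
    sal[j]? = sal0[j]? ∨ (sal0[j]? = some none ∧ sal[j]? = some (some (Fp cd sal0 (j : Int))))

theorem goA_eq (cd : PySem.Dict Int (List Int)) (sal0 : List (Option Int))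
    (hg : GoodCD cd sal0.length) :
    ∀ (f : Nat) (n : Int) (sal : List (Option Int)),
      0 ≤ n → n < (sal0.length : Int) →
      (sal0[n.toNat]? = some none → n ∈ cd.keys) →
      sal0.length - n.toNat < f → CacheOK cd sal0 sal →
      (getSalaryGoA cd f n sal).1 = Fp cd sal0 n ∧
      CacheOK cd sal0 (getSalaryGoA cd f n sal).2 := by
  intro f
  induction f with
  | zero => intro n sal hn0 hn hk hf hc; omega
  | succ f ih =>
    intro n sal hn0 hn hk hf hc
    obtain ⟨hlen, hinv⟩ := hc
    have hnNat : n.toNat < sal0.length := by omega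
    have hcast : ((n.toNat : Int)) = n := Int.toNat_of_nonneg hn0
    have hget : PySem.List.pyGet? sal n = sal[n.toNat]? := PySem.List.pyGet?_of_nonneg _ hn0
    obtain ⟨o, ho⟩ : ∃ o, sal[n.toNat]? = some o :=
      ⟨sal[n.toNat]'(by omega), List.getElem?_eq_getElem (by omega)⟩
    cases o with
    | some v =>
      -- cache hit in the current list
      have hv : v = Fp cd sal0 n := by
        rcases hinv n.toNat hnNat with h | ⟨h0, hw⟩
        · have : PySem.List.pyGet? sal0 n = some (some v) := by
            rw [show PySem.List.pyGet? sal0 n = sal0[n.toNat]? from PySem.List.pyGet?_of_nonneg _ hn0]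
            rw [← h, ho]
          exact ((Fp_hit cd sal0 n v this)).symm
        · rw [ho] at hw
          simp only [Option.some.injEq] at hw
          rw [hcast] at hw
          exact hw
      constructor
      · simp only [getSalaryGoA, hget, ho]
        exact hv
      · simp only [getSalaryGoA, hget, ho]
        exact ⟨hlen, hinv⟩
    | none =>
      -- miss: the original list misses too
      have h0 : sal0[n.toNat]? = some none := by
        rcases hinv n.toNat hnNat with h | ⟨h0, hw⟩
        · rw [← h, ho]
        · rw [ho] at hw; exact absurd hw (by simp)
      have h0' : PySem.List.pyGet? sal0 n = some none := by
        rw [show PySem.List.pyGet? sal0 n = sal0[n.toNat]? from PySem.List.pyGet?_of_nonneg _ hn0, h0]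
      have hkey : n ∈ cd.keys := hk h0
      have hcont : (cd.get? n).isSome := by
        rw [← PySem.Dict.contains_eq_isSome_get?]
        exact (PySem.Dict.contains_iff_mem_keys cd n).2 hkey
      obtain ⟨cs, hcd⟩ : ∃ cs, cd.get? n = some cs := Option.isSome_iff_exists.1 hcont
      by_cases hcs : cs = []
      · subst hcs
        -- leaf: salaries[num] = 1
        have hset : PySem.List.pySetD sal n (some (1 : Int)) = sal.set n.toNat (some 1) :=
          PySem.List.pySetD_of_nonneg _ _ hn0
        have hrb : (sal.set n.toNat (some (1 : Int)))[n.toNat]? = some (some 1) := by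
          rw [List.getElem?_set]
          simp [show n.toNat < sal.length from by omega]
        have hfp : Fp cd sal0 n = 1 := Fp_leaf cd sal0 n h0' hcd
        simp only [getSalaryGoA, hget, ho, hcd, List.isEmpty_nil, if_true]
        constructor
        · rw [hset, show PySem.List.pyGet? (sal.set n.toNat (some (1:Int))) n = (sal.set n.toNat (some (1:Int)))[n.toNat]? from PySem.List.pyGet?_of_nonneg _ hn0, hrb, hfp]
          rfl
        · refine ⟨by simpa [hset] using hlen, ?_⟩
          intro j hj
          by_cases hjn : j = n.toNat
          · subst hjn
            right
            refine ⟨h0, ?_⟩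
            rw [hset, hrb, hcast, hfp]
          · rw [hset, List.getElem?_set_ne (by omega)]
            exact hinv j hj
      · -- internal node
        have hchild : ∀ c ∈ cs, n < c ∧ c < (sal0.length : Int) ∧ c ∈ cd.keys := by
          intro c hcm
          have h := hg (n, cs) (PySem.Dict.mem_items_of_get?_eq_some cd hcd) c hcm
          exact ⟨h.1, h.2.2.1, h.2.2.2⟩
        have hfold : ∀ (cs' : List Int),
            (∀ c ∈ cs', n < c ∧ c < (sal0.length : Int) ∧ c ∈ cd.keys) →
            ∀ (acc : List Int) (sal1 : List (Option Int)),
            CacheOK cd sal0 sal1 →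
            (cs'.foldl (fun (acc : List Int × List (Option Int)) c =>
                let s := getSalaryGoA cd f c acc.2
                (acc.1 ++ [s.1], s.2)) (acc, sal1)).1 = acc ++ cs'.map (Fp cd sal0) ∧
            CacheOK cd sal0 ((cs'.foldl (fun (acc : List Int × List (Option Int)) c =>
                let s := getSalaryGoA cd f c acc.2
                (acc.1 ++ [s.1], s.2)) (acc, sal1)).2) := by
          intro cs'
          induction cs' with
          | nil => intro _ acc sal1 hc1; simpa using hc1
          | cons c t iht =>
            intro hcs' acc sal1 hc1
            have hcmem := hcs' c (List.mem_cons_self)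
            have hrec := ih c sal1 (by omega) hcmem.2.1 (fun _ => hcmem.2.2)
              (by omega) hc1
            simp only [List.foldl_cons]
            have ht := iht (fun c' hc' => hcs' c' (List.mem_cons_of_mem _ hc'))
              (acc ++ [(getSalaryGoA cd f c sal1).1]) ((getSalaryGoA cd f c sal1).2) hrec.2
            refine ⟨?_, ht.2⟩
            rw [ht.1, hrec.1]
            simp
        have hr := hfold cs hchild [] sal ⟨hlen, hinv⟩
        have hfp : Fp cd sal0 n =
            (PySem.List.max? (cs.map (Fp cd sal0)) (fun x => x)).getD 0 +
            (PySem.List.min? (cs.map (Fp cd sal0)) (fun x => x)).getD 0 + 1 :=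
          Fp_node cd sal0 hg n h0' cs hcd hcs
        simp only [getSalaryGoA, hget, ho, hcd]
        rw [if_neg (show ¬cs.isEmpty = true by simp [hcs])]
        obtain ⟨hr1, hr2⟩ := hr
        obtain ⟨hlen2, hinv2⟩ := hr2
        rw [hr1]
        simp only [List.nil_append]
        set m := (PySem.List.max? (cs.map (Fp cd sal0)) (fun x => x)).getD 0 +
                 (PySem.List.min? (cs.map (Fp cd sal0)) (fun x => x)).getD 0 + 1 with hm
        set sal2 := (cs.foldl (fun (acc : List Int × List (Option Int)) c =>
                let s := getSalaryGoA cd f c acc.2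
                (acc.1 ++ [s.1], s.2)) ([], sal)).2 with hsal2
        have hset : PySem.List.pySetD sal2 n (some m) = sal2.set n.toNat (some m) :=
          PySem.List.pySetD_of_nonneg _ _ hn0
        have hrb : (sal2.set n.toNat (some m))[n.toNat]? = some (some m) := by
          rw [List.getElem?_set]
          simp [show n.toNat < sal2.length from by omega]
        constructor
        · rw [hset, show PySem.List.pyGet? (sal2.set n.toNat (some m)) n = (sal2.set n.toNat (some m))[n.toNat]? from PySem.List.pyGet?_of_nonneg _ hn0, hrb, hfp]
          rfl
        · refine ⟨by simpa [hset] using hlen2, ?_⟩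
          intro j hj
          by_cases hjn : j = n.toNat
          · subst hjn
            right
            refine ⟨h0, ?_⟩
            rw [hset, hrb, hcast, hfp]
          · rw [hset, List.getElem?_set_ne (by omega)]
            exact hinv2 j hj

def InvB (cd : PySem.Dict Int (List Int)) (sal0 : List (Option Int))
    (processed : List Int) (M : PySem.Dict Int Int) : Prop :=
  ∀ k : Int,
    (k ∈ processed ∧ PySem.List.pyGet? sal0 k = some none → M.get? k = some (Fp cd sal0 k)) ∧
    (k ∉ processed ∨ PySem.List.pyGet? sal0 k ≠ some none → M.get? k = none)

theorem loopB (cd : PySem.Dict Int (List Int)) (sal0 : List (Option Int))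
    (hg : GoodCD cd sal0.length)
    (hks : ∀ k ∈ cd.keys, PySem.Raise.InRange sal0.length k) :
    ∀ (l2 l1 : List Int) (M : PySem.Dict Int Int),
      PySem.List.sorted cd.keys (fun k => k) true = l1 ++ l2 →
      InvB cd sal0 l1 M →
      InvB cd sal0 (l1 ++ l2) (l2.foldl (stepB sal0 cd) M) := by
  intro l2
  induction l2 with
  | nil => intro l1 M _ hI; simpa using hI
  | cons n t ihl =>
    intro l1 M hsplit hI
    have hnmem : n ∈ cd.keys := by
      have : n ∈ PySem.List.sorted cd.keys (fun k => k) true := by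
        rw [hsplit]; simp
      rwa [PySem.List.mem_sorted] at this
    have hnin : PySem.Raise.InRange sal0.length n := hks n hnmem
    obtain ⟨o, ho⟩ : ∃ o, PySem.List.pyGet? sal0 n = some o := by
      rcases h : PySem.List.pyGet? sal0 n with _ | o
      · exact absurd ((PySem.List.pyGet?_eq_none_iff sal0 n).1 h) (by simpa using hnin)
      · exact ⟨o, rfl⟩
    have hstep2 : ∀ M', InvB cd sal0 (l1 ++ [n]) M' →
        InvB cd sal0 (l1 ++ n :: t) (t.foldl (stepB sal0 cd) M') := by
      intro M' hI'
      have := ihl (l1 ++ [n]) M' (by simpa using hsplit) hI'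
      simpa using this
    cases o with
    | some v =>
      -- salaries[n] is not None: skip
      have hsame : stepB sal0 cd M n = M := by simp [stepB, ho]
      simp only [List.foldl_cons, hsame]
      apply hstep2
      intro k
      constructor
      · rintro ⟨hkm, hmiss⟩
        rcases (by simpa using hkm : k ∈ l1 ∨ k = n) with h | rfl
        · exact ((hI k).1 ⟨h, hmiss⟩)
        · rw [ho] at hmiss; cases hmiss
      · intro h
        apply (hI k).2
        rcases h with h | h
        · left; intro hk; exact h (by simpa using Or.inl hk)
        · right; exact h
    | none =>
      -- salaries[n] is None: compute memo[n]
      obtain ⟨cs, hcd⟩ : ∃ cs, cd.get? n = some cs :=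
        Option.isSome_iff_exists.1 (by
          rw [← PySem.Dict.contains_eq_isSome_get?]
          exact (PySem.Dict.contains_iff_mem_keys cd n).2 hnmem)
      -- every child is an earlier (larger) key, already in memo or cached
      have hpw : (l1 ++ n :: t).Pairwise (fun a b => b ≤ a) := by
        rw [← hsplit]
        exact PySem.List.sorted_pairwise_rev cd.keys (fun k => k)
      have hchild : ∀ c ∈ cs,
          (match PySem.List.pyGet? sal0 c with
            | some (some v) => v
            | _ => M.getD c 0) = Fp cd sal0 c := by
        intro c hcm
        have hgc := hg (n, cs) (PySem.Dict.mem_items_of_get?_eq_some cd hcd) c hcm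
        have hckey : c ∈ cd.keys := hgc.2.2.2
        have hcl1 : c ∈ l1 := by
          have : c ∈ l1 ++ n :: t := by
            rw [← hsplit, PySem.List.mem_sorted]; exact hckey
          rcases List.mem_append.1 this with h | h
          · exact h
          · rcases List.mem_cons.1 h with rfl | h
            · exact absurd hgc.1 (lt_irrefl _)
            · have := (List.pairwise_append.1 hpw).2.1
              have hle : c ≤ n := (List.pairwise_cons.1 this).1 c h
              exact absurd hgc.1 (by omega)
        rcases hc : PySem.List.pyGet? sal0 c with _ | ⟨_ | w⟩
        · exact absurd ((PySem.List.pyGet?_eq_none_iff sal0 c).1 hc) (by simpa using hks c hckey)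
        · have := (hI c).1 ⟨hcl1, hc⟩
          simp [PySem.Dict.getD_eq_get?_getD, this]
        · exact (Fp_hit cd sal0 c w hc).symm
      have hvals : ((cd.get? n).getD []).map (fun c =>
          match PySem.List.pyGet? sal0 c with
          | some (some v) => v
          | _ => M.getD c 0) = cs.map (Fp cd sal0) := by
        rw [hcd]
        exact List.map_congr_left hchild
      have hw : stepB sal0 cd M n = M.insert n (Fp cd sal0 n) := by
        by_cases hcs : cs = []
        · subst hcs
          simp only [stepB, ho, hvals]
          rw [Fp_leaf cd sal0 n ho hcd]
          rfl
        · simp only [stepB, ho, hvals]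
          rw [if_neg (by simp [hcs]), Fp_node cd sal0 hg n ho cs hcd hcs]
      simp only [List.foldl_cons, hw]
      apply hstep2
      intro k
      by_cases hkn : k = n
      · subst hkn
        constructor
        · intro _
          rw [PySem.Dict.get?_insert_self]
        · rintro (h | h)
          · exact absurd (by simp) h
          · exact absurd ho h
      · constructor
        · rintro ⟨hkm, hmiss⟩
          rw [PySem.Dict.get?_insert, if_neg hkn]
          exact (hI k).1 ⟨by rcases (by simpa using hkm : k ∈ l1 ∨ k = n) with h | rfl; exact h; exact absurd rfl hkn, hmiss⟩
        · intro h
          rw [PySem.Dict.get?_insert, if_neg hkn]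
          apply (hI k).2
          rcases h with h | h
          · left; intro hk; exact h (by simpa using Or.inl hk)
          · right; exact h


-- ===== VERDICT (by name: the statement is the Claim_ definition above) =====
theorem get_salary_spec : Claim_equal_get_salary := by
  intro num child_dict sal _hdom hpre
  obtain ⟨hinr, hmiss⟩ := hpre
  have hlen0 : 0 < sal.length := by
    have h := hinr; unfold PySem.Raise.InRange at h; omega
  have hkeysmk : (PySem.Dict.mk child_dict).keys = child_dict.map Prod.fst := by
    simp [PySem.Dict.keys]
  unfold Spec_get_salary get_salary get_salary_alt
  rcases hpg : PySem.List.pyGet? sal num with _ | ⟨_ | v⟩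
  · -- IndexError: excluded by Pre_
    exact absurd ((PySem.List.pyGet?_eq_none_iff sal num).1 hpg) (not_not_intro hinr)
  · -- salaries[num] is None: A computes Fp, B computes Fp
    obtain ⟨hn0, hkey, _hnd, hgood⟩ := hmiss hpg
    have hkIn : ∀ k ∈ (PySem.Dict.mk child_dict).keys, PySem.Raise.InRange sal.length k := by
      intro k hk
      rw [hkeysmk] at hk
      obtain ⟨p, hp, hpk⟩ := List.mem_map.1 hk
      exact hpk ▸ (hgood p hp).1
    have hg : GoodCD (PySem.Dict.mk child_dict) sal.length := by
      intro p hp c hc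
      have hitems : (PySem.Dict.mk child_dict).items = child_dict := rfl
      rw [hitems] at hp
      have h := (hgood p hp).2 c hc
      have hcIn : PySem.Raise.InRange sal.length c := by
        obtain ⟨q, hq, hqc⟩ := List.mem_map.1 h.2.2
        exact hqc ▸ (hgood q hq).1
      exact ⟨h.1, hcIn.1, h.2.1, by rw [hkeysmk]; exact h.2.2⟩
    have hkey' : num ∈ (PySem.Dict.mk child_dict).keys := by rw [hkeysmk]; exact hkey
    have h0 : sal[num.toNat]? = some none := by
      rw [← PySem.List.pyGet?_of_nonneg _ hn0]; exact hpg
    have hA := goA_eq (PySem.Dict.mk child_dict) sal hg (2 * sal.length + 2) num sal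
      hn0 (by have h := hinr; unfold PySem.Raise.InRange at h; omega) (fun _ => hkey') (by omega)
      ⟨rfl, fun j hj => Or.inl rfl⟩
    have hB := loopB (PySem.Dict.mk child_dict) sal hg hkIn
      (PySem.List.sorted (PySem.Dict.mk child_dict).keys (fun k => k) true) [] PySem.Dict.empty
      (by simp)
      (fun k => ⟨(by rintro ⟨h, _⟩; cases h), (fun _ => by simp)⟩)
    have hnum_sorted : num ∈ PySem.List.sorted (PySem.Dict.mk child_dict).keys (fun k => k) true := by
      rw [PySem.List.mem_sorted]; exact hkey'
    have hBnum := (hB num).1 ⟨by simpa using hnum_sorted, hpg⟩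
    simp only [hA.1]
    rw [PySem.Dict.getD_eq_get?_getD, hBnum]
    rfl
  · -- salaries[num] is not None: both return the cached value
    rw [show 2 * sal.length + 2 = (2 * sal.length + 1) + 1 from rfl]
    simp [getSalaryGoA, hpg]
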